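-- pv_equiv track=rewrite | github.com/zhiyuan-95/stock_RAG | ingest_stock.py | _instant_record_map
-- ===== SOURCE A (Python) =====
-- def _latest_records_by_key(entries, key_builder):
--     latest_entries = {}
--     for entry in entries:
--         key = key_builder(entry)
--         existing = latest_entries.get(key)
--         if existing is None or entry["filed"] > existing["filed"]:
--             latest_entries[key] = entry
--     return latest_entries
--
-- def _instant_record_map(entries, frequency):
--     if frequency == "annual":
--         instant_entries = [entry for entry in entries if entry["form"].startswith("10-K")]
--     else:
--         instant_entries = [
--             entry
--             for entry in entries
--             if entry["form"].startswith("10-Q") or entry["form"].startswith("10-K")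
--         ]
--
--     return {
--         end_date: entry
--         for end_date, entry in _latest_records_by_key(
--             instant_entries,
--             lambda item: item["end"],
--         ).items()
--     }
-- ===== SOURCE B (Python) =====
-- def _instant_record_map(entries, frequency):
--     if frequency == "annual":
--         prefixes = ("10-K",)
--     else:
--         prefixes = ("10-Q", "10-K")
--     groups = {}
--     for entry in entries:
--         if entry["form"].startswith(prefixes):
--             groups.setdefault(entry["end"], []).append(entry)
--     return {
--         end: max(group, key=lambda item: item["filed"])
--         for end, group in groups.items()
--     }
-- ===== Notes on version B (the rewrite author's own statement) =====
-- stated objective: alternative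
-- what changed: Instead of keeping a running best-by-'filed' entry per end-date while scanning (overwrite on strictly greater), B groups the form-filtered entries by end-date in insertion order and then takes max(group, key='filed') per group, whose first-maximal rule reproduces A's first-wins tie-breaking.
import Mathlib
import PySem

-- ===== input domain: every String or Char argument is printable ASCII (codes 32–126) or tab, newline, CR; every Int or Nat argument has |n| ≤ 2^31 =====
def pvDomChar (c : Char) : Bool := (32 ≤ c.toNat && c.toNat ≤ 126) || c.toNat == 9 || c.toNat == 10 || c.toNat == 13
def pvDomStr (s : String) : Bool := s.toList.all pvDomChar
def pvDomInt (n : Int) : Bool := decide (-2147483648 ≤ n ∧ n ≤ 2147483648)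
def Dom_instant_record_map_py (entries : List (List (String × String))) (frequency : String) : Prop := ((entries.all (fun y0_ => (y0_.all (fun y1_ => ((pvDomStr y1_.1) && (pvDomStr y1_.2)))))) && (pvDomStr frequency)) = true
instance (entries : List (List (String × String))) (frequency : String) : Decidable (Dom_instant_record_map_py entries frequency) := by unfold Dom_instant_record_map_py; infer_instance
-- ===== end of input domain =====

-- B replaces A's running best-by-'filed' per end-date with group-by-end-date then max(group, key='filed');
-- same complexity, different decomposition ("alternative"); equivalence of the RETURN value is proved on Pre_.

-- entry["k"] for an entry (a Python dict, here an association list); Pre_ guarantees the key is present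
-- wherever A's code looks one up, so the "" default is never reached on admitted inputs.
def pvGet (e : List (String × String)) (k : String) : String :=
  ((PySem.Dict.mk e).get? k).getD ""

-- ===== PORT A =====
-- the two list comprehensions under A's `if frequency == "annual"` branch
def pvFilterA (entries : List (List (String × String))) (frequency : String) : List (List (String × String)) :=
  if frequency == "annual" then
    entries.filter (fun e => PySem.Str.startswith (pvGet e "form") "10-K")
  else
    entries.filter (fun e =>
      PySem.Str.startswith (pvGet e "form") "10-Q" || PySem.Str.startswith (pvGet e "form") "10-K")

-- one iteration of _latest_records_by_key's loop (key_builder = item["end"])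
def pvLatestStep (d : PySem.Dict String (List (String × String))) (e : List (String × String)) :
    PySem.Dict String (List (String × String)) :=
  match d.get? (pvGet e "end") with
  | none => d.insert (pvGet e "end") e
  | some existing =>
      if pvGet existing "filed" < pvGet e "filed" then d.insert (pvGet e "end") e else d

def instant_record_map_py (entries : List (List (String × String))) (frequency : String) :
    List (String × List (String × String)) :=
  -- instant_entries, then _latest_records_by_key's loop, then the dict comprehension over .items()
  (((pvFilterA entries frequency).foldl pvLatestStep PySem.Dict.empty).items.foldl
      (fun a p => a.insert p.1 p.2) PySem.Dict.empty).items

-- ===== PORT B =====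
-- entry["form"].startswith(prefixes), prefixes chosen from frequency
def pvFormOK (frequency : String) (e : List (String × String)) : Bool :=
  if frequency == "annual" then
    PySem.Str.startswith (pvGet e "form") "10-K"
  else
    PySem.Str.startswith (pvGet e "form") "10-Q" || PySem.Str.startswith (pvGet e "form") "10-K"

-- max(group, key=lambda item: item["filed"]): first maximal element (Python keeps the current max on ties)
def pvMaxFiled (g : List (List (String × String))) : List (String × String) :=
  match g with
  | [] => []          -- unreachable: groups are built non-empty
  | h :: t => t.foldl (fun m x => if pvGet m "filed" < pvGet x "filed" then x else m) h

-- groups.setdefault(entry["end"], []).append(entry): overwrite-in-place insert of the extended group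
def pvGroupStep (d : PySem.Dict String (List (List (String × String))))
    (e : List (String × String)) : PySem.Dict String (List (List (String × String))) :=
  d.insert (pvGet e "end") (d.getD (pvGet e "end") [] ++ [e])

def instant_record_map_py_alt (entries : List (List (String × String))) (frequency : String) :
    List (String × List (String × String)) :=
  -- the grouping loop, then the final dict comprehension taking max(group, key=...) per group
  (entries.foldl (fun d e => if pvFormOK frequency e then pvGroupStep d e else d)
      PySem.Dict.empty).items.map (fun p => (p.1, pvMaxFiled p.2))

-- ===== PRECONDITION & SPEC =====
-- Pre_ excludes exactly the inputs on which Python A raises KeyError: an entry without a "form" key,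
-- or an entry passing the form filter without an "end" or "filed" key.
def Pre_instant_record_map_py (entries : List (List (String × String))) (frequency : String) : Prop :=
  ∀ e ∈ entries, ((PySem.Dict.mk e).get? "form").isSome = true ∧
    ((if frequency == "annual" then
        PySem.Str.startswith (pvGet e "form") "10-K"
      else
        PySem.Str.startswith (pvGet e "form") "10-Q" || PySem.Str.startswith (pvGet e "form") "10-K") = true →
      ((PySem.Dict.mk e).get? "end").isSome = true ∧ ((PySem.Dict.mk e).get? "filed").isSome = true)
instance (entries : List (List (String × String))) (frequency : String) :
    Decidable (Pre_instant_record_map_py entries frequency) := by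
  unfold Pre_instant_record_map_py; infer_instance

def pvWitness_instant_record_map_py : (List (List (String × String))) × String :=
  ([[("form", "10-K"), ("end", "2023-12-31"), ("filed", "2024-02-01")],
    [("form", "10-Q"), ("end", "2023-09-30"), ("filed", "2023-11-01")]], "annual")

def Spec_instant_record_map_py (entries : List (List (String × String))) (frequency : String)
    (out : List (String × List (String × String))) : Prop :=
  out = instant_record_map_py_alt entries frequency
instance (entries : List (List (String × String))) (frequency : String)
    (out : List (String × List (String × String))) :
    Decidable (Spec_instant_record_map_py entries frequency out) := by
  unfold Spec_instant_record_map_py; infer_instance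

-- ===== CLAIM (what is proved, stated in full; the proofs are below) =====
def Claim_equal_instant_record_map_py : Prop :=
  ∀ (entries : List (List (String × String))) (frequency : String),
    Dom_instant_record_map_py entries frequency → Pre_instant_record_map_py entries frequency →
    Spec_instant_record_map_py entries frequency (instant_record_map_py entries frequency)

-- ===== LEMMAS AND PROOFS =====

-- the simulation map: A's running dict is B's group dict with every group collapsed to its max
def pvMapD (g : PySem.Dict String (List (List (String × String)))) :
    PySem.Dict String (List (String × String)) :=
  PySem.Dict.mk (g.items.map (fun p => (p.1, pvMaxFiled p.2)))

theorem pvMapD_keys (g : PySem.Dict String (List (List (String × String)))) :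
    (pvMapD g).keys = g.keys := by
  simp [pvMapD, PySem.Dict.keys]

theorem pvMapD_get? (g : PySem.Dict String (List (List (String × String)))) (k : String) :
    (pvMapD g).get? k = (g.get? k).map pvMaxFiled := by
  simp only [pvMapD, PySem.Dict.get?, List.find?_map]
  rcases h : g.items.find? (fun p => p.1 == k) with _ | p <;>
    simp_all [Function.comp_def]

theorem pvMapD_contains (g : PySem.Dict String (List (List (String × String)))) (k : String) :
    (pvMapD g).contains k = g.contains k := by
  simp [PySem.Dict.contains_eq_isSome_get?, pvMapD_get?]

theorem pvMapD_insert (g : PySem.Dict String (List (List (String × String)))) (k : String)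
    (v : List (List (String × String))) :
    pvMapD (g.insert k v) = (pvMapD g).insert k (pvMaxFiled v) := by
  apply PySem.Dict.ext
  by_cases h : g.contains k = true
  · have h' : (pvMapD g).contains k = true := by rw [pvMapD_contains]; exact h
    rw [PySem.Dict.items_insert_of_contains _ _ h']
    simp only [pvMapD, PySem.Dict.items_insert_of_contains _ _ h, List.map_map]
    apply List.map_congr_left
    intro p _
    by_cases hk : p.1 = k <;> simp [hk]
  · have h' : (pvMapD g).contains k = false := by rw [pvMapD_contains]; simpa using h
    rw [PySem.Dict.items_insert_of_not_contains _ _ h']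
    simp only [pvMapD, PySem.Dict.items_insert_of_not_contains _ _ (by simpa using h : g.contains k = false)]
    simp

-- inserting the value already stored at k is a no-op (keys unique)
theorem pvInsert_same {ν : Type} (d : PySem.Dict String ν) (k : String) (v : ν)
    (hnd : d.keys.Nodup) (hget : d.get? k = some v) : d.insert k v = d := by
  apply PySem.Dict.ext
  have hc : d.contains k = true := by
    simp [PySem.Dict.contains_eq_isSome_get?, hget]
  rw [PySem.Dict.items_insert_of_contains _ _ hc]
  have hkv : (k, v) ∈ d.items := PySem.Dict.mem_items_of_get?_eq_some _ hget
  conv_rhs => rw [← List.map_id d.items]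
  apply List.map_congr_left
  intro p hp
  by_cases hk : (p.1 == k) = true
  · have hk' : p.1 = k := by simpa using hk
    have : d.get? p.1 = some p.2 := PySem.Dict.get?_of_mem_items _ hp hnd
    rw [hk', hget] at this
    cases p
    simp_all
  · simp [hk]

theorem pvMaxFiled_append (v : List (List (String × String))) (e : List (String × String))
    (hv : v ≠ []) :
    pvMaxFiled (v ++ [e]) =
      if pvGet (pvMaxFiled v) "filed" < pvGet e "filed" then e else pvMaxFiled v := by
  rcases v with _ | ⟨h, t⟩
  · exact absurd rfl hv
  · simp [pvMaxFiled, List.foldl_append]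

theorem pvGroup_get?_ne_nil (g : PySem.Dict String (List (List (String × String))))
    (hne : ∀ p ∈ g.items, p.2 ≠ []) (k : String) (v : List (List (String × String)))
    (h : g.get? k = some v) : v ≠ [] := by
  have := PySem.Dict.mem_items_of_get?_eq_some _ h
  exact hne _ this

-- main simulation lemma: running A's loop from pvMapD g tracks running B's grouping loop from g
theorem pvMain (l : List (List (String × String)))
    (g : PySem.Dict String (List (List (String × String))))
    (hnd : g.keys.Nodup) (hne : ∀ p ∈ g.items, p.2 ≠ []) :
    l.foldl pvLatestStep (pvMapD g) = pvMapD (l.foldl pvGroupStep g) := by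
  induction l generalizing g with
  | nil => simp
  | cons e rest ih =>
    simp only [List.foldl_cons]
    have hstep : pvLatestStep (pvMapD g) e = pvMapD (pvGroupStep g e) := by
      unfold pvLatestStep pvGroupStep
      rw [pvMapD_get?]
      rcases hget : g.get? (pvGet e "end") with _ | v
      · simp only [Option.map_none]
        rw [PySem.Dict.getD_of_get?_eq_none _ _ hget, pvMapD_insert]
        rfl
      · simp only [Option.map_some]
        rw [PySem.Dict.getD_of_get?_eq_some _ _ hget, pvMapD_insert,
          pvMaxFiled_append v e (pvGroup_get?_ne_nil g hne _ _ hget)]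
        by_cases hlt : pvGet (pvMaxFiled v) "filed" < pvGet e "filed"
        · simp [hlt]
        · simp only [hlt, if_false]
          refine (pvInsert_same _ _ _ ?_ ?_).symm
          · rw [pvMapD_keys]; exact hnd
          · rw [pvMapD_get?, hget]; rfl
    rw [hstep]
    apply ih
    · unfold pvGroupStep; exact PySem.Dict.nodup_keys_insert _ _ _ hnd
    · unfold pvGroupStep
      intro p hp
      rcases (PySem.Dict.mem_items_insert _ _ _ _).mp hp with h | ⟨h, _⟩
      · subst h; simp
      · exact hne _ h

theorem pvFilterA_eq (entries : List (List (String × String))) (frequency : String) :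
    pvFilterA entries frequency = entries.filter (pvFormOK frequency) := by
  unfold pvFilterA pvFormOK
  by_cases h : (frequency == "annual") = true <;> simp [h]

-- the rebuilding dict comprehension over .items() is the identity when keys are unique
theorem pvRebuild {ν : Type} (d : PySem.Dict String ν) (hnd : d.keys.Nodup) :
    (d.items.foldl (fun a p => a.insert p.1 p.2) PySem.Dict.empty).items = d.items := by
  have h := PySem.Dict.items_foldl_insert_fresh d.items Prod.fst Prod.snd PySem.Dict.empty
    (by intro a _; simp [PySem.Dict.contains_empty]) hnd
  simpa using h

-- ===== VERDICT (by name: the statement is the Claim_ definition above) =====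
theorem instant_record_map_py_spec : Claim_equal_instant_record_map_py := by
  intro entries frequency _ _
  unfold Spec_instant_record_map_py instant_record_map_py instant_record_map_py_alt
  rw [pvFilterA_eq]
  have hguard : entries.foldl (fun d e => if pvFormOK frequency e then pvGroupStep d e else d)
      PySem.Dict.empty = (entries.filter (pvFormOK frequency)).foldl pvGroupStep PySem.Dict.empty := by
    rw [List.foldl_filter]
  rw [hguard]
  have hmain := pvMain (entries.filter (pvFormOK frequency)) PySem.Dict.empty
    (by simp [PySem.Dict.keys_empty]) (by intro p hp; simp [PySem.Dict.empty] at hp)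
  have hempty : pvMapD PySem.Dict.empty = PySem.Dict.empty := rfl
  rw [hempty] at hmain
  rw [hmain]
  set G := (entries.filter (pvFormOK frequency)).foldl pvGroupStep PySem.Dict.empty with hG
  have hGnd : G.keys.Nodup := by
    rw [hG]
    exact PySem.Dict.nodup_keys_foldl_insert_key _ (fun e => pvGet e "end") _ _
      (by simp [PySem.Dict.keys_empty])
  have hnd : (pvMapD G).keys.Nodup := by rw [pvMapD_keys]; exact hGnd
  rw [pvRebuild _ hnd]
  rfl
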